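-- pv_equiv track=rewrite | github.com/cxy1997/graphite-utils | bin/gtop3.py | get_server_partitions
-- ===== SOURCE A (Python) =====
-- def get_server_partitions(string):
--     lines = string.rstrip().split("\n")
--     lines = list(
--         map(lambda x: list(filter(lambda y: len(y) > 0, x.split(":"))), lines))
--     lines = list(filter(lambda x: len(x) > 0, lines))
--     infos = dict()
--     for line in lines:
--         if line[1] in ("interactive_cpu", "interactive", "default_gpu*"):
--             continue
--         if line[0] not in infos:
--             infos[line[0]] = line[1]
--         else:
--             infos[line[0]] += ", " + line[1]
--     return infos
-- ===== SOURCE B (Python) =====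
-- def get_server_partitions(string):
--     # Stage 1: collect the (server, partition) pairs, dropping the three reserved names.
--     pairs = []
--     for ln in string.rstrip().split("\n"):
--         fields = [f for f in ln.split(":") if f]
--         if fields and fields[1] not in ("interactive_cpu", "interactive", "default_gpu*"):
--             pairs.append((fields[0], fields[1]))
--     # Stage 2: servers in first-occurrence order.
--     servers = list(dict.fromkeys(s for s, _ in pairs))
--     # Stage 3: for each server, gather its partitions by rescanning the pair list.
--     return {s: ", ".join(p for t, p in pairs if t == s) for s in servers}
-- ===== Notes on version B (the rewrite author's own statement) =====
-- stated objective: alternative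
-- what changed: B replaces A's single-pass dict with running string concatenation by a collect-then-group algorithm: stage 1 flattens the input into a list of (server, partition) pairs, stage 2 dedups servers in first-occurrence order, stage 3 builds each output value by rescanning the pair list and joining the matches; trades A's O(n) pass for an O(n*k) grouping with no dict accumulator in the parse loop.
import Mathlib
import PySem

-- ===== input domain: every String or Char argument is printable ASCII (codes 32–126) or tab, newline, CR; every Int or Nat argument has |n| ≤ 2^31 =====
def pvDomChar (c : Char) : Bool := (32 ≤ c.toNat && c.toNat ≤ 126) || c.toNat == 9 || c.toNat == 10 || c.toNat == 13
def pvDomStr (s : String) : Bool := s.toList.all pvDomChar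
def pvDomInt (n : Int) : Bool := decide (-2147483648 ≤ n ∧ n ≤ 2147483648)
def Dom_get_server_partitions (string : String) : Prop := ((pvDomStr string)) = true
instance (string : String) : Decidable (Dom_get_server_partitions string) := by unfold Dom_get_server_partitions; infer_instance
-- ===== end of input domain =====

-- B first collects all (server, partition) pairs into a flat list, then builds the result by
-- grouping: servers in first-occurrence order, each joined by rescanning the pair list
-- (alternative collect-then-group algorithm); same return value as A wherever A returns.

-- ===== PORT A =====
-- loop body of A: line[1] lookup, skip-set test, first-occurrence/append branch
def gspA_step (d : PySem.Dict String String) (line : List String) : PySem.Dict String String :=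
  match PySem.List.pyGet? line 1 with
  | none => d   -- line[1] out of range: Python raises IndexError here; Pre_ excludes these inputs
  | some p1 =>
    if p1 == "interactive_cpu" || p1 == "interactive" || p1 == "default_gpu*" then d
    else
      if !(d.contains (PySem.List.pyGetD line 0 "")) then
        d.insert (PySem.List.pyGetD line 0 "") p1
      else
        d.insert (PySem.List.pyGetD line 0 "")
          (d.getD (PySem.List.pyGetD line 0 "") "" ++ ", " ++ p1)

def get_server_partitions (string : String) : List (String × String) :=
  let lines := ((PySem.Str.split? (PySem.Str.rstrip string) "\n").getD []).map
      (fun x => ((PySem.Str.split? x ":").getD []).filter (fun y => decide (0 < PySem.Str.len y)))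
  let lines2 := lines.filter (fun x => decide (0 < x.length))
  (lines2.foldl gspA_step PySem.Dict.empty).items

-- ===== PORT B =====
-- stage-1 loop body of B: filter the colon-separated fields, append the (server, partition) pair unless the
-- line is empty or the partition is one of the three reserved names
def gspB_pairs_step (acc : List (String × String)) (ln : String) : List (String × String) :=
  let fields := ((PySem.Str.split? ln ":").getD []).filter (fun f => !(f == ""))
  if fields.isEmpty then acc
  else
    match PySem.List.pyGet? fields 1 with
    | none => acc   -- fields[1] out of range: Python raises IndexError here; Pre_ excludes these inputs
    | some p =>
      if p == "interactive_cpu" || p == "interactive" || p == "default_gpu*" then acc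
      else acc ++ [(PySem.List.pyGetD fields 0 "", p)]

def get_server_partitions_alt (string : String) : List (String × String) :=
  let pairs := ((PySem.Str.split? (PySem.Str.rstrip string) "\n").getD []).foldl gspB_pairs_step []
  let servers := PySem.List.dedup (pairs.map Prod.fst)
  servers.map (fun s =>
    (s, PySem.Str.join ", " ((pairs.filter (fun q => q.1 == s)).map Prod.snd)))

-- ===== PRECONDITION & SPEC =====
-- Pre_ excludes exactly the strings containing a line with exactly one nonempty colon-separated field,
-- on which A (and B) raise IndexError at line[1] resp. fields[1].
def Pre_get_server_partitions (string : String) : Prop :=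
  ∀ ln ∈ (PySem.Str.split? (PySem.Str.rstrip string) "\n").getD [],
    (((PySem.Str.split? ln ":").getD []).filter (fun p => !(p == ""))).length ≠ 1
instance (string : String) : Decidable (Pre_get_server_partitions string) := by
  unfold Pre_get_server_partitions; infer_instance

def pvWitness_get_server_partitions : String := "gpu1:part_a\ngpu1:part_b\ncpu2:small"

def Spec_get_server_partitions (string : String) (out : List (String × String)) : Prop := out = get_server_partitions_alt string
instance (string : String) (out : List (String × String)) : Decidable (Spec_get_server_partitions string out) := by unfold Spec_get_server_partitions; infer_instance

-- ===== CLAIM (what is proved, stated in full; the proofs are below) =====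
def Claim_equal_get_server_partitions : Prop := ∀ (string : String), Dom_get_server_partitions string → Pre_get_server_partitions string → Spec_get_server_partitions string (get_server_partitions string)

-- ===== LEMMAS AND PROOFS =====

-- the pair a single line contributes to B's pair list ([] for skipped lines)
def gspPairOf (ln : String) : List (String × String) :=
  let fields := ((PySem.Str.split? ln ":").getD []).filter (fun f => !(f == ""))
  if fields.isEmpty then []
  else
    match PySem.List.pyGet? fields 1 with
    | none => []
    | some p =>
      if p == "interactive_cpu" || p == "interactive" || p == "default_gpu*" then []
      else [(PySem.List.pyGetD fields 0 "", p)]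

-- A's loop body seen as acting on one (server, partition) pair
def gspA_pairStep (d : PySem.Dict String String) (q : String × String) : PySem.Dict String String :=
  if !(d.contains q.1) then d.insert q.1 q.2
  else d.insert q.1 (d.getD q.1 "" ++ ", " ++ q.2)

-- the items A's dict holds after processing a pair list L, stated as B computes them
def gspSpecItems (L : List (String × String)) : List (String × String) :=
  (PySem.Set.ofList (L.map Prod.fst)).map (fun s =>
    (s, PySem.Str.join ", " ((L.filter (fun q => q.1 == s)).map Prod.snd)))

lemma chars_join_append_singleton (sep c : List Char) (l : List (List Char)) (h : l ≠ []) :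
    PySem.Chars.join sep (l ++ [c]) = PySem.Chars.join sep l ++ sep ++ c := by
  induction l with
  | nil => exact absurd rfl h
  | cons a t ih =>
    cases t with
    | nil => simp [PySem.Chars.join_cons_cons, PySem.Chars.join_singleton]
    | cons b t' =>
      have := ih (by simp)
      simp only [List.cons_append, PySem.Chars.join_cons_cons] at *
      simp [this]

lemma str_join_append_singleton (l : List String) (p : String) (h : l ≠ []) :
    PySem.Str.join ", " (l ++ [p]) = PySem.Str.join ", " l ++ ", " ++ p := by
  apply String.toList_inj.mp
  simp only [String.toList_append, PySem.Str.toList_join, List.map_append, List.map_cons,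
    List.map_nil]
  exact chars_join_append_singleton _ _ _ (by simpa using h)

lemma str_join_singleton (p : String) : PySem.Str.join ", " [p] = p := by
  apply String.toList_inj.mp
  simp [PySem.Str.toList_join, PySem.Chars.join_singleton]

lemma gsp_keys_of_items {d : PySem.Dict String String} {L : List (String × String)}
    (h : d.items = gspSpecItems L) : d.keys = PySem.Set.ofList (L.map Prod.fst) := by
  show d.items.map Prod.fst = _
  rw [h, gspSpecItems, List.map_map]
  exact List.map_id'' (congrFun rfl) _

lemma gsp_pairStep_items (d : PySem.Dict String String) (L : List (String × String))
    (h : d.items = gspSpecItems L) (q : String × String) :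
    (gspA_pairStep d q).items = gspSpecItems (L ++ [q]) := by
  obtain ⟨s, p⟩ := q
  have hkeys := gsp_keys_of_items h
  have hnd : d.keys.Nodup := by rw [hkeys]; exact PySem.Set.nodup_ofList _
  have hcont : d.contains s = decide (s ∈ L.map Prod.fst) := by
    rw [PySem.Dict.contains_eq_decide_mem_keys, hkeys]
    simp [PySem.Set.mem_ofList]
  have hservers : PySem.Set.ofList ((L ++ [(s, p)]).map Prod.fst)
      = PySem.Set.add (PySem.Set.ofList (L.map Prod.fst)) s := by
    simp [PySem.Set.ofList_append_singleton]
  by_cases hmem : s ∈ L.map Prod.fst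
  · -- server already present: A overwrites in place, B's server list is unchanged
    have hc : d.contains s = true := by rw [hcont]; simpa using hmem
    have hfilter_ne : L.filter (fun q => q.1 == s) ≠ [] := by
      rcases List.mem_map.mp hmem with ⟨r, hr, hrs⟩
      intro hnil
      have : r ∈ L.filter (fun q => q.1 == s) := by
        simp [List.mem_filter, hr, hrs]
      simp [hnil] at this
    have hgetD : d.getD s "" = PySem.Str.join ", " ((L.filter (fun q => q.1 == s)).map Prod.snd) := by
      apply PySem.Dict.getD_of_mem_items d _ hnd
      rw [h, gspSpecItems]
      exact List.mem_map.mpr ⟨s, by simpa [PySem.Set.mem_ofList] using hmem, rfl⟩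
    rw [gspA_pairStep]
    simp only [hc, Bool.not_true, Bool.false_eq_true, if_false]
    rw [PySem.Dict.items_insert_of_contains _ _ hc, h, gspSpecItems, gspSpecItems,
      hservers, PySem.Set.add, List.map_map]
    simp only [PySem.Set.contains_eq_listContains, List.contains_eq_mem,
      PySem.Set.mem_ofList, hmem, decide_true, if_true]
    apply List.map_congr_left
    intro t ht
    by_cases hts : t = s
    · subst hts
      have hjoin : PySem.Str.join ", " ((List.map Prod.snd (L.filter (fun q => q.1 == t))) ++ [p])
          = PySem.Str.join ", " (List.map Prod.snd (L.filter (fun q => q.1 == t))) ++ ", " ++ p :=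
        str_join_append_singleton _ _ (by simpa using hfilter_ne)
      simp [Function.comp, hgetD, List.filter_append, hjoin]
    · simp [Function.comp, hts, List.filter_append, Ne.symm hts]
  · -- fresh server: A appends a new entry, B's server list gains s at the end
    have hc : d.contains s = false := by rw [hcont]; simpa using hmem
    have hfilter_nil : L.filter (fun q => q.1 == s) = [] := by
      apply List.filter_eq_nil_iff.mpr
      intro r hr hrs
      exact hmem (List.mem_map.mpr ⟨r, hr, by simpa using hrs⟩)
    rw [gspA_pairStep]
    simp only [hc, Bool.not_false, if_true]
    rw [PySem.Dict.items_insert_of_not_contains _ _ hc, h, gspSpecItems, gspSpecItems,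
      hservers, PySem.Set.add]
    simp only [PySem.Set.contains_eq_listContains, List.contains_eq_mem,
      PySem.Set.mem_ofList, hmem, decide_false, Bool.false_eq_true, if_false, List.map_append]
    congr 1
    · apply List.map_congr_left
      intro t ht
      have hts : t ≠ s := fun hts => hmem (by
        simpa [PySem.Set.mem_ofList, hts] using ht)
      simp [List.filter_append, Ne.symm hts]
    · simp [List.filter_append, hfilter_nil, str_join_singleton]

lemma gsp_fold_pairStep_items (M L : List (String × String)) (d : PySem.Dict String String)
    (h : d.items = gspSpecItems L) :
    (M.foldl gspA_pairStep d).items = gspSpecItems (L ++ M) := by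
  induction M generalizing L d with
  | nil => simpa using h
  | cons q M ih =>
    have := ih (L ++ [q]) (gspA_pairStep d q) (gsp_pairStep_items d L h q)
    simpa using this

-- B's stage-1 fold collects exactly the per-line pairs, in order
lemma gsp_pairs_fold (L : List String) (acc : List (String × String)) :
    L.foldl gspB_pairs_step acc = acc ++ L.flatMap gspPairOf := by
  induction L generalizing acc with
  | nil => simp
  | cons a t ih =>
    rw [List.foldl_cons, ih]
    have : gspB_pairs_step acc a = acc ++ gspPairOf a := by
      rw [gspB_pairs_step, gspPairOf]
      rcases hf : ((PySem.Str.split? a ":").getD []).filter (fun f => !(f == "")) with _ | ⟨s, rest⟩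
      · simp
      · simp only [List.isEmpty_cons, Bool.false_eq_true, if_false]
        cases hg : PySem.List.pyGet? (s :: rest) 1 with
        | none => simp
        | some p =>
          dsimp only
          split_ifs <;> simp
    rw [this, List.flatMap_cons, List.append_assoc]

-- under Pre_, A's per-line fold is the pair fold over the collected pairs
lemma gsp_lines_fold_eq_pairs_fold (L : List String) (d : PySem.Dict String String)
    (hpre : ∀ ln ∈ L, (((PySem.Str.split? ln ":").getD []).filter (fun p => !(p == ""))).length ≠ 1) :
    L.foldl (fun d x =>
        if decide (0 < (((PySem.Str.split? x ":").getD []).filter (fun p => !(p == ""))).length) = true then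
          gspA_step d (((PySem.Str.split? x ":").getD []).filter (fun p => !(p == ""))) else d) d
      = (L.flatMap gspPairOf).foldl gspA_pairStep d := by
  induction L generalizing d with
  | nil => simp
  | cons a t ih =>
    rw [List.foldl_cons, List.flatMap_cons, List.foldl_append]
    have hstep : (if decide (0 < (((PySem.Str.split? a ":").getD []).filter (fun p => !(p == ""))).length) = true then
          gspA_step d (((PySem.Str.split? a ":").getD []).filter (fun p => !(p == ""))) else d)
        = (gspPairOf a).foldl gspA_pairStep d := by
      rw [gspPairOf]
      rcases hf : ((PySem.Str.split? a ":").getD []).filter (fun p => !(p == "")) with _ | ⟨s, _ | ⟨p, rest⟩⟩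
      · simp
      · exact absurd (by simp [hf]) (hpre a (by simp))
      · simp only [List.length_cons, Nat.zero_lt_succ, decide_true, if_true,
          List.isEmpty_cons, Bool.false_eq_true, if_false]
        have hget1 : PySem.List.pyGet? (s :: p :: rest) 1 = some p := by
          simp [PySem.List.pyGet?, PySem.List.pyIdx?]
        have hget0 : PySem.List.pyGetD (s :: p :: rest) 0 "" = s := by
          simp [PySem.List.pyGetD_ofNat']
        rw [gspA_step, hget1]
        by_cases hskip : (p == "interactive_cpu" || p == "interactive" || p == "default_gpu*") = true
        · simp [hskip]
        · simp [hskip, hget0, gspA_pairStep]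
    rw [hstep]
    exact ih _ (fun ln hln => hpre ln (by simp [hln]))

lemma gsp_pred_eq (y : String) : decide (0 < PySem.Str.len y) = !(y == "") := by
  rw [PySem.Str.len_eq]
  cases hy : y.toList with
  | nil =>
    have : y = "" := String.toList_inj.mp (by simp [hy])
    simp [this]
  | cons c t =>
    have : y ≠ "" := fun h => by simp [h] at hy
    simp [this]

-- ===== VERDICT (by name: the statement is the Claim_ definition above) =====
theorem get_server_partitions_spec : Claim_equal_get_server_partitions := by
  intro string _ hpre
  show get_server_partitions string = get_server_partitions_alt string
  rw [get_server_partitions, get_server_partitions_alt]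
  simp only [gsp_pred_eq, List.foldl_filter, List.foldl_map]
  rw [gsp_lines_fold_eq_pairs_fold _ _ hpre, gsp_pairs_fold,
    gsp_fold_pairStep_items _ [] PySem.Dict.empty rfl]
  simp [gspSpecItems]
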